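-- pv_equiv track=rewrite | github.com/gituser1234566/some_coding | NER-classification/IN5550-mandatory-2-master/exploring_and_extra_scripts/dataset_processing.py | find_substring_index
-- ===== SOURCE A (Python) =====
-- def find_substring_index(substring_list, string_list):
--     indexes = []
--     for substring in substring_list:
--         try:
--             index = next(i for i, string in enumerate(string_list) if substring in string)
--             indexes.append(index)
--         except StopIteration:
--             indexes.append(-1)
--     return indexes
-- ===== SOURCE B (Python) =====
-- def find_substring_index(substring_list, string_list):
--     # One pass over string_list, maintaining a shrinking list of unresolved
--     # substring indices; breaks early once every substring has been located.
--     result = [-1] * len(substring_list)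
--     pending = list(range(len(substring_list)))
--     for i, s in enumerate(string_list):
--         if not pending:
--             break
--         still = []
--         keep = still.append
--         for j in pending:
--             if substring_list[j] in s:
--                 result[j] = i
--             else:
--                 keep(j)
--         pending = still
--     return result
-- ===== Notes on version B (the rewrite author's own statement) =====
-- stated objective: alternative
-- what changed: Replaces A's per-substring inner scan over string_list with a single outer pass over string_list that maintains a shrinking pending list of unresolved substring indices (with early exit once all are found), writing into a preallocated result array.
import Mathlib
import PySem

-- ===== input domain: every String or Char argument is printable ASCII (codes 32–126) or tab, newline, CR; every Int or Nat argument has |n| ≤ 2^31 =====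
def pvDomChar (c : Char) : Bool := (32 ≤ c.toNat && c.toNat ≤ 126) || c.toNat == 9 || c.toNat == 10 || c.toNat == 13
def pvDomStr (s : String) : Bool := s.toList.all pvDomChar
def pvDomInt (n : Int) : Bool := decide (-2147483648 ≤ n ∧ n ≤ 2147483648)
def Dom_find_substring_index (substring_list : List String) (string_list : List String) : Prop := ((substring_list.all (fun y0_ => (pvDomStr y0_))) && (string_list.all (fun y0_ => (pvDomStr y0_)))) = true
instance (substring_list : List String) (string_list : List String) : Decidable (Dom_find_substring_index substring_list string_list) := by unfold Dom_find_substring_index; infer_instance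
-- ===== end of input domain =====

-- B replaces A's per-substring scan of string_list by one outer pass over string_list with a
-- shrinking pending list of unresolved substring indices (alternative decomposition; return values equal).

-- ===== PORT A =====
-- next(i for i, string in enumerate(string_list) if substring in string), -1 on StopIteration
def firstIdxAux (substring : String) : List String → Nat → Int
  | [], _ => -1
  | s :: rest, i => if PySem.Str.isIn substring s then (i : Int) else firstIdxAux substring rest (i + 1)

def find_substring_index (substring_list : List String) (string_list : List String) : List Int :=
  substring_list.foldl (fun indexes substring => indexes ++ [firstIdxAux substring string_list 0]) []

-- ===== PORT B =====
-- inner 'for j in pending' loop body: match → result[j] = i, else keep j in 'still'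
-- (substring_list[j]: j is always < length by B's invariant; getD "" is the hand port of that in-range index)
def altStep (subs : List String) (s : String) (i : Nat) (acc : List Int × List Nat) (j : Nat) : List Int × List Nat :=
  if PySem.Str.isIn (subs.getD j "") s then (acc.1.set j (i : Int), acc.2) else (acc.1, acc.2 ++ [j])

-- 'for i, s in enumerate(string_list): if not pending: break; …'
def altLoop (subs : List String) : List String → Nat → List Int → List Nat → List Int
  | [], _, result, _ => result
  | s :: rest, i, result, pending =>
    if pending.isEmpty then result
    else
      let rs := pending.foldl (altStep subs s i) (result, [])
      altLoop subs rest (i + 1) rs.1 rs.2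

def find_substring_index_alt (substring_list : List String) (string_list : List String) : List Int :=
  altLoop substring_list string_list 0 (List.replicate substring_list.length (-1))
    (List.range substring_list.length)

-- ===== PRECONDITION & SPEC =====
def Spec_find_substring_index (substring_list : List String) (string_list : List String) (out : List Int) : Prop := out = find_substring_index_alt substring_list string_list
instance (substring_list : List String) (string_list : List String) (out : List Int) : Decidable (Spec_find_substring_index substring_list string_list out) := by unfold Spec_find_substring_index; infer_instance

-- ===== CLAIM (what is proved, stated in full; the proofs are below) =====
def Claim_equal_find_substring_index : Prop := ∀ (substring_list : List String) (string_list : List String), Dom_find_substring_index substring_list string_list → Spec_find_substring_index substring_list string_list (find_substring_index substring_list string_list)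

-- ===== LEMMAS AND PROOFS =====

-- characterisation of the inner pending-scan fold
lemma altStep_foldl (subs : List String) (s : String) (i : Nat) :
    ∀ (pending : List Nat) (res : List Int) (still0 : List Nat),
      pending.Nodup → (∀ j ∈ pending, j < res.length) →
      (pending.foldl (altStep subs s i) (res, still0)).2
        = still0 ++ pending.filter (fun j => !(PySem.Str.isIn (subs.getD j "") s)) ∧
      (pending.foldl (altStep subs s i) (res, still0)).1.length = res.length ∧
      ∀ k, (pending.foldl (altStep subs s i) (res, still0)).1[k]?
        = if k ∈ pending ∧ PySem.Str.isIn (subs.getD k "") s = true then some (i : Int)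
          else res[k]? := by
  intro pending
  induction pending with
  | nil => intro res still0 _ _; simp
  | cons j t ih =>
    intro res still0 hnd hb
    have hjlen : j < res.length := hb j (by simp)
    by_cases hm : PySem.Str.isIn (subs.getD j "") s = true
    · have hm' : PySem.Chars.isIn ((subs[j]?.getD "").toList) s.toList = true := by
        simpa using hm
      have hstep : altStep subs s i (res, still0) j = (res.set j (i : Int), still0) := by
        simp [altStep, hm']
      rw [List.foldl_cons, hstep]
      obtain ⟨h2, hlen, hget⟩ := ih (res.set j (i : Int)) still0 hnd.of_cons
        (by intro x hx; simpa using hb x (List.mem_cons_of_mem _ hx))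
      refine ⟨?_, by simpa using hlen, ?_⟩
      · rw [h2]; simp [hm']
      · intro k
        rw [hget k]
        by_cases hkt : k ∈ t
        · by_cases hmk : PySem.Chars.isIn ((subs[k]?.getD "").toList) s.toList = true
          · simp [hkt, hmk]
          · have hkj : k ≠ j := fun h => hmk (h ▸ hm')
            simp [List.mem_cons, hkt, hmk, hkj, List.getElem?_set_ne (Ne.symm hkj)]
        · by_cases hkj : k = j
          · subst hkj
            simp [hm', hjlen]
          · simp [List.mem_cons, hkt, hkj, List.getElem?_set_ne (Ne.symm hkj)]
    · have hm' : PySem.Chars.isIn ((subs[j]?.getD "").toList) s.toList = false := by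
        simpa using hm
      have hstep : altStep subs s i (res, still0) j = (res, still0 ++ [j]) := by
        simp [altStep, hm']
      rw [List.foldl_cons, hstep]
      obtain ⟨h2, hlen, hget⟩ := ih res (still0 ++ [j]) hnd.of_cons
        (by intro x hx; exact hb x (List.mem_cons_of_mem _ hx))
      refine ⟨?_, hlen, ?_⟩
      · rw [h2]; simp [hm']
      · intro k
        rw [hget k]
        by_cases hkj : k = j
        · subst hkj; simp [hm']
        · simp [List.mem_cons, hkj]

-- characterisation of B's outer loop: pending slots get their first index from 'rest', others keep their value
lemma altLoop_getElem? (subs : List String) :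
    ∀ (rest : List String) (i : Nat) (result : List Int) (pending : List Nat),
      pending.Nodup →
      (∀ j ∈ pending, j < result.length ∧ result[j]? = some (-1)) →
      ∀ k, (altLoop subs rest i result pending)[k]?
        = if k ∈ pending then some (firstIdxAux (subs.getD k "") rest i) else result[k]? := by
  intro rest
  induction rest with
  | nil =>
    intro i result pending _ hp k
    by_cases hk : k ∈ pending
    · simp [altLoop, firstIdxAux, hk, (hp k hk).2]
    · simp [altLoop, hk]
  | cons s rest' ih =>
    intro i result pending hnd hp k
    by_cases hemp : pending.isEmpty
    · have : pending = [] := List.isEmpty_iff.mp hemp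
      subst this
      simp [altLoop]
    · rw [altLoop, if_neg hemp]
      obtain ⟨h2, hlen, hget⟩ := altStep_foldl subs s i pending result []
        hnd (fun j hj => (hp j hj).1)
      set rs := pending.foldl (altStep subs s i) (result, []) with hrs
      have hmemrs2 : ∀ x, x ∈ rs.2 ↔ x ∈ pending ∧ PySem.Str.isIn (subs.getD x "") s = false := by
        intro x; rw [h2]; simp
      have hrec := ih (i + 1) rs.1 rs.2
        (by rw [h2]; simpa using hnd.filter _)
        (by
          intro j hj
          obtain ⟨hjp, hjm⟩ := (hmemrs2 j).mp hj
          have hjm' : PySem.Chars.isIn ((subs[j]?.getD "").toList) s.toList = false := by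
            simpa using hjm
          constructor
          · rw [hlen]; exact (hp j hjp).1
          · rw [hget j, if_neg (by simp [hjm'])]
            exact (hp j hjp).2) k
      rw [hrec]
      by_cases hkp : k ∈ pending
      · by_cases hmk : PySem.Str.isIn (subs.getD k "") s = true
        · have hmk' : PySem.Chars.isIn ((subs[k]?.getD "").toList) s.toList = true := by
            simpa using hmk
          rw [if_neg (by rw [hmemrs2]; simp [hmk']), hget k, if_pos ⟨hkp, hmk⟩,
            if_pos hkp]
          simp [firstIdxAux, hmk']
        · have hmk' : PySem.Chars.isIn ((subs[k]?.getD "").toList) s.toList = false := by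
            simpa using hmk
          rw [if_pos ((hmemrs2 k).mpr ⟨hkp, by simpa using hmk⟩), if_pos hkp]
          simp [firstIdxAux, hmk']
      · rw [if_neg (fun h => hkp ((hmemrs2 k).mp h).1), hget k,
          if_neg (by simp [hkp]), if_neg hkp]

-- A's fold is the map of firstIdxAux
lemma portA_eq_map (subs strs : List String) :
    find_substring_index subs strs = subs.map (fun sub => firstIdxAux sub strs 0) := by
  unfold find_substring_index
  simpa using PySem.List.foldl_append_singleton_eq_map (fun sub => firstIdxAux sub strs 0) subs []

-- ===== VERDICT (by name: the statement is the Claim_ definition above) =====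
theorem find_substring_index_spec : Claim_equal_find_substring_index := by
  intro subs strs _
  unfold Spec_find_substring_index
  rw [portA_eq_map]
  unfold find_substring_index_alt
  apply List.ext_getElem?
  intro k
  rw [altLoop_getElem? subs strs 0 (List.replicate subs.length (-1)) (List.range subs.length)
    (List.nodup_range) (by intro j hj; simp at hj; simp [hj])]
  by_cases hk : k < subs.length
  · rw [if_pos (List.mem_range.mpr hk)]
    have : subs.getD k "" = subs[k] := by
      simp [List.getD_eq_getElem?_getD, List.getElem?_eq_getElem hk]
    simp [List.getElem?_map, List.getElem?_eq_getElem hk]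
  · rw [if_neg (fun h => hk (List.mem_range.mp h))]
    simp [Nat.le_of_not_lt hk]
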